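-- pv_equiv track=rewrite | github.com/vinceajcs/all-things-python | algorithms/threeway_set_disjointness/threeway_set_disjointness.py | disjoint_quadratic
-- ===== SOURCE A (Python) =====
-- def disjoint_quadratic(A, B, C):
--     for a in A:
--         for b in B:
--             if a == b:  # check for value in set C only if value is found in both A and B
--                 for c in C:
--                     if a == c:
--                         return False
--     return True
-- ===== SOURCE B (Python) =====
-- def disjoint_quadratic(A, B, C):
--     return not (set(A) & set(B) & set(C))
-- ===== Notes on version B (the rewrite author's own statement) =====
-- stated objective: simpler
-- what changed: Replaces the triply nested membership scans with a single set-intersection emptiness test: not (set(A) & set(B) & set(C)).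
import Mathlib
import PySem

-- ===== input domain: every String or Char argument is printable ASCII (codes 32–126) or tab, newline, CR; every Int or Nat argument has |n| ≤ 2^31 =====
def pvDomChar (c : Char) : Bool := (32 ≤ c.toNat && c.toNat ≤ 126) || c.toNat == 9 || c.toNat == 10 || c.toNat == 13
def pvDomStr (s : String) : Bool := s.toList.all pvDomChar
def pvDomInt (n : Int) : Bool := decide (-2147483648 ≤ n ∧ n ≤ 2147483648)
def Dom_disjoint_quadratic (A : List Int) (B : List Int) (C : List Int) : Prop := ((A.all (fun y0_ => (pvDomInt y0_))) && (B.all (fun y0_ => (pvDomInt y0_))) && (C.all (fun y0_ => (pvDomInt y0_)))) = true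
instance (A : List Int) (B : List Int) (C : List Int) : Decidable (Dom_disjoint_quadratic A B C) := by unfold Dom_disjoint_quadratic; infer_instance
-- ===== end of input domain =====

-- B replaces the triply nested scans with a single set-intersection emptiness test (simpler).
-- ===== PORT A =====
-- inner 'for c in C: if a == c: return False' — true means the Python returned False
def pvLoopC (a : Int) : List Int → Bool
  | [] => false
  | c :: cs => if a == c then true else pvLoopC a cs

-- 'for b in B: if a == b: <loop over C>' — true means the Python returned False
def pvLoopB (a : Int) (C : List Int) : List Int → Bool
  | [] => false
  | b :: bs => if a == b then (if pvLoopC a C then true else pvLoopB a C bs) else pvLoopB a C bs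

def disjoint_quadratic (A : List Int) (B : List Int) (C : List Int) : Bool :=
  match A with
  | [] => true
  | a :: as_ => if pvLoopB a C B then false else disjoint_quadratic as_ B C

-- ===== PORT B =====
-- not (set(A) & set(B) & set(C))
def disjoint_quadratic_alt (A : List Int) (B : List Int) (C : List Int) : Bool :=
  (PySem.Set.inter (PySem.Set.inter (PySem.Set.ofList A) (PySem.Set.ofList B)) (PySem.Set.ofList C)).isEmpty

-- ===== PRECONDITION & SPEC =====
def Spec_disjoint_quadratic (A : List Int) (B : List Int) (C : List Int) (out : Bool) : Prop := out = disjoint_quadratic_alt A B C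
instance (A : List Int) (B : List Int) (C : List Int) (out : Bool) : Decidable (Spec_disjoint_quadratic A B C out) := by unfold Spec_disjoint_quadratic; infer_instance

-- ===== CLAIM (what is proved, stated in full; the proofs are below) =====
def Claim_equal_disjoint_quadratic : Prop := ∀ (A : List Int) (B : List Int) (C : List Int), Dom_disjoint_quadratic A B C → Spec_disjoint_quadratic A B C (disjoint_quadratic A B C)

-- ===== LEMMAS AND PROOFS =====
theorem pvLoopC_true_iff (a : Int) (C : List Int) : pvLoopC a C = true ↔ a ∈ C := by
  induction C with
  | nil => simp [pvLoopC]
  | cons c cs ih => by_cases h : a = c <;> simp [pvLoopC, h, ih]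

theorem pvLoopB_true_iff (a : Int) (C B : List Int) :
    pvLoopB a C B = true ↔ a ∈ B ∧ a ∈ C := by
  induction B with
  | nil => simp [pvLoopB]
  | cons b bs ih =>
    by_cases h : a = b
    · subst h
      rcases hc : pvLoopC a C with _ | _
      · have hnc : a ∉ C := fun m => by simp [(pvLoopC_true_iff a C).mpr m] at hc
        simp [pvLoopB, hc, ih, hnc]
      · have hcm : a ∈ C := (pvLoopC_true_iff a C).mp hc
        simp [pvLoopB, hc, hcm]
    · simp [pvLoopB, h, ih]

theorem a_true_iff (A B C : List Int) :
    disjoint_quadratic A B C = true ↔ ∀ a ∈ A, ¬ (a ∈ B ∧ a ∈ C) := by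
  induction A with
  | nil => simp [disjoint_quadratic]
  | cons a as_ ih =>
    simp only [disjoint_quadratic]
    by_cases h : pvLoopB a C B = true
    · rcases (pvLoopB_true_iff a C B).mp h with ⟨hb, hc⟩
      rw [if_pos h]
      constructor
      · intro hf
        exact absurd hf (by simp)
      · intro hall
        exact (hall a (by simp) ⟨hb, hc⟩).elim
    · have hnb : ¬ (a ∈ B ∧ a ∈ C) := fun hb => h ((pvLoopB_true_iff a C B).mpr hb)
      rw [if_neg h, ih]
      simp only [List.forall_mem_cons]
      exact ⟨fun h2 => ⟨hnb, h2⟩, fun h2 => h2.2⟩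

theorem alt_true_iff (A B C : List Int) :
    disjoint_quadratic_alt A B C = true ↔ ∀ a ∈ A, ¬ (a ∈ B ∧ a ∈ C) := by
  unfold disjoint_quadratic_alt
  rw [List.isEmpty_iff, List.eq_nil_iff_forall_not_mem]
  constructor
  · intro h a ha hbc
    exact h a (by
      rw [PySem.Set.mem_inter, PySem.Set.mem_inter, PySem.Set.mem_ofList,
        PySem.Set.mem_ofList, PySem.Set.mem_ofList]
      exact ⟨⟨ha, hbc.1⟩, hbc.2⟩)
  · intro h x hx
    rw [PySem.Set.mem_inter, PySem.Set.mem_inter, PySem.Set.mem_ofList,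
      PySem.Set.mem_ofList, PySem.Set.mem_ofList] at hx
    exact h x hx.1.1 ⟨hx.1.2, hx.2⟩

-- ===== VERDICT (by name: the statement is the Claim_ definition above) =====
theorem disjoint_quadratic_spec : Claim_equal_disjoint_quadratic := by
  intro A B C _
  unfold Spec_disjoint_quadratic
  have h := (a_true_iff A B C).trans (alt_true_iff A B C).symm
  cases ha : disjoint_quadratic A B C <;>
    cases hb : disjoint_quadratic_alt A B C <;> simp_all
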